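-- pv_equiv track=rewrite | github.com/zrefai/swap-ease-clustering-api | src/apis/openSea/eventsClass.py | __bucketEventsByTokenId
-- ===== SOURCE A (Python) =====
-- def __bucketEventsByTokenId(assetEvents):
--     buckets = {}
--
--     for event in assetEvents:
--         if event['tokenId'] in buckets:
--             buckets[event['tokenId']].append(event)
--         else:
--             buckets[event['tokenId']] = [event]
--
--     return buckets
-- ===== SOURCE B (Python) =====
-- def __bucketEventsByTokenId(assetEvents):
--     keys = dict.fromkeys(event['tokenId'] for event in assetEvents)
--     return {tid: [e for e in assetEvents if e['tokenId'] == tid] for tid in keys}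
-- ===== Notes on version B (the rewrite author's own statement) =====
-- stated objective: simpler
-- what changed: Replaces the incremental event-major bucketing loop by a key-major two-pass: dict.fromkeys collects the distinct tokenIds in first-occurrence order, then one comprehension per key materialises its bucket by filtering the event list.
import Mathlib
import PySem

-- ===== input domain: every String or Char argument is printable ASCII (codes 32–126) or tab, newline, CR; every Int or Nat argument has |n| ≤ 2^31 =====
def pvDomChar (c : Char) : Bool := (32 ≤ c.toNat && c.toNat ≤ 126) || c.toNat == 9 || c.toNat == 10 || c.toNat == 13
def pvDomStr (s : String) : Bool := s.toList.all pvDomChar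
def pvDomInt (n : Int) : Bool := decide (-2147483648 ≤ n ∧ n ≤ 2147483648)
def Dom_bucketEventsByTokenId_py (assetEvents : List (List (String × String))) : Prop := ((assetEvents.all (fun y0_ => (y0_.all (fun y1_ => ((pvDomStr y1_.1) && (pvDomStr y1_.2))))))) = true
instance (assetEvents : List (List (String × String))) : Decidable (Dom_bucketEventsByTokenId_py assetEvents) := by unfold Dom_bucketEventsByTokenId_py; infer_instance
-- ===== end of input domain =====

-- B: key-major two-pass (distinct tokenIds first, then one filter per key) instead of A's incremental event-major bucketing; same result, simpler decomposition, not faster.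
-- event['tokenId'] (used identically by A and B); total stand-in: Pre_ guarantees the key is present (Python raises KeyError otherwise)
def pvKey (e : List (String × String)) : String := (PySem.Dict.mk e).getD "tokenId" ""

-- ===== PORT A =====
def bucketEventsByTokenId_py (assetEvents : List (List (String × String))) : List (String × List (List (String × String))) :=
  (assetEvents.foldl (fun buckets event =>
      if buckets.contains (pvKey event) then
        buckets.modify (pvKey event) [] (fun l => l ++ [event])
      else
        buckets.insert (pvKey event) [event])
    (PySem.Dict.empty : PySem.Dict String (List (List (String × String))))).items

-- ===== PORT B =====
def bucketEventsByTokenId_py_alt (assetEvents : List (List (String × String))) : List (String × List (List (String × String))) :=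
  let keys := PySem.List.dedup (assetEvents.map pvKey)
  keys.map (fun tid => (tid, assetEvents.filter (fun e => pvKey e == tid)))

-- ===== PRECONDITION & SPEC =====
-- Pre_: every event carries a "tokenId" key; A (and B) raise KeyError otherwise.
def Pre_bucketEventsByTokenId_py (assetEvents : List (List (String × String))) : Prop :=
  (assetEvents.all (fun e => e.any (fun p => p.1 == "tokenId"))) = true
instance (assetEvents : List (List (String × String))) : Decidable (Pre_bucketEventsByTokenId_py assetEvents) := by unfold Pre_bucketEventsByTokenId_py; infer_instance
def pvWitness_bucketEventsByTokenId_py : (List (List (String × String))) :=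
  [[("tokenId", "1"), ("price", "2")], [("tokenId", "2")], [("tokenId", "1"), ("x", "y")]]

-- ===== PRECONDITION & SPEC =====
def Spec_bucketEventsByTokenId_py (assetEvents : List (List (String × String))) (out : List (String × List (List (String × String)))) : Prop := out = bucketEventsByTokenId_py_alt assetEvents
instance (assetEvents : List (List (String × String))) (out : List (String × List (List (String × String)))) : Decidable (Spec_bucketEventsByTokenId_py assetEvents out) := by unfold Spec_bucketEventsByTokenId_py; infer_instance

-- ===== CLAIM (what is proved, stated in full; the proofs are below) =====
def Claim_equal_bucketEventsByTokenId_py : Prop := ∀ (assetEvents : List (List (String × String))), Dom_bucketEventsByTokenId_py assetEvents → Pre_bucketEventsByTokenId_py assetEvents → Spec_bucketEventsByTokenId_py assetEvents (bucketEventsByTokenId_py assetEvents)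

-- ===== LEMMAS AND PROOFS =====

-- A's loop body, named for the lemmas below
def pvStep (d : PySem.Dict String (List (List (String × String)))) (e : List (String × String)) :
    PySem.Dict String (List (List (String × String))) :=
  if d.contains (pvKey e) then d.modify (pvKey e) [] (fun l => l ++ [e]) else d.insert (pvKey e) [e]

theorem pvStep_keys (d : PySem.Dict String (List (List (String × String))))
    (e : List (String × String)) :
    (pvStep d e).keys = PySem.Set.add d.keys (pvKey e) := by
  by_cases h : d.contains (pvKey e)
  · have hm : pvKey e ∈ d.keys := (PySem.Dict.contains_iff_mem_keys d _).1 h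
    rw [pvStep, if_pos h, PySem.Dict.keys_modify,
      PySem.Dict.keys_insert_of_contains _ _ h, PySem.Set.add_of_mem hm]
  · have hm : pvKey e ∉ d.keys := fun hmem => h ((PySem.Dict.contains_iff_mem_keys d _).2 hmem)
    rw [pvStep, if_neg h,
      PySem.Dict.keys_insert_of_not_contains _ _ (by simpa using h),
      PySem.Set.add_of_not_mem hm]

theorem pvKeys_foldl (evts : List (List (String × String)))
    (d : PySem.Dict String (List (List (String × String)))) :
    (evts.foldl pvStep d).keys = PySem.Set.update d.keys (evts.map pvKey) := by
  induction evts generalizing d with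
  | nil => simp [PySem.Set.update_nil]
  | cons e evts ih =>
    rw [List.foldl_cons, List.map_cons, PySem.Set.update_cons, ih, pvStep_keys]

theorem pvGetD_foldl (evts : List (List (String × String)))
    (d : PySem.Dict String (List (List (String × String)))) (t : String) :
    (evts.foldl pvStep d).getD t [] = d.getD t [] ++ evts.filter (fun e => pvKey e == t) := by
  induction evts generalizing d with
  | nil => simp
  | cons e evts ih =>
    rw [List.foldl_cons, ih]
    have hstep : (pvStep d e).getD t [] = d.getD t [] ++ (if pvKey e = t then [e] else []) := by
      by_cases ht : t = pvKey e
      · subst ht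
        by_cases hc : d.contains (pvKey e)
        · rw [pvStep, if_pos hc, PySem.Dict.getD_modify_self, if_pos rfl]
        · rw [pvStep, if_neg hc, PySem.Dict.getD_insert_self, if_pos rfl,
            PySem.Dict.getD_of_not_contains _ _ (by simpa using hc), List.nil_append]
      · have ht' : pvKey e ≠ t := fun h => ht h.symm
        by_cases hc : d.contains (pvKey e)
        · rw [pvStep, if_pos hc, PySem.Dict.getD_modify_of_ne _ _ _ ht, if_neg ht',
            List.append_nil]
        · rw [pvStep, if_neg hc, PySem.Dict.getD_insert_of_ne _ _ _ ht, if_neg ht',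
            List.append_nil]
    rw [hstep, List.filter_cons]
    by_cases hk : pvKey e = t <;> simp [hk]

theorem pvNodup_keys_foldl (evts : List (List (String × String)))
    (d : PySem.Dict String (List (List (String × String)))) (hd : d.keys.Nodup) :
    (evts.foldl pvStep d).keys.Nodup := by
  rw [pvKeys_foldl]; exact PySem.Set.nodup_update _ _ hd

-- ===== VERDICT (by name: the statement is the Claim_ definition above) =====
theorem bucketEventsByTokenId_py_spec : Claim_equal_bucketEventsByTokenId_py := by
  intro evts _ _
  unfold Spec_bucketEventsByTokenId_py bucketEventsByTokenId_py bucketEventsByTokenId_py_alt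
  show (evts.foldl pvStep PySem.Dict.empty).items = _
  rw [PySem.Dict.items_eq_map_keys _ (pvNodup_keys_foldl _ _ (by simp)) [],
    pvKeys_foldl]
  simp [pvGetD_foldl, PySem.Set.update_nil_left]
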